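-- pv_equiv track=rewrite | github.com/swatisgupta/python_plot_scripts | post_analysis.py | get_w_count
-- ===== SOURCE A (Python) =====
-- def get_w_count(list1, app, w, comp, cond = 0):
--     i = 0
--     count = 0
--     while i < w:
--         if i != 0 and app[i-1] != app[i]:
--             count = 0
--         if cond == 0 and list1[i] > comp:
--            count = count + 1
--         elif cond == 1 and list1[i] < comp:
--            count = count + 1
--         i = i + 1
--     return count
-- ===== SOURCE B (Python) =====
-- def get_w_count(list1, app, w, comp, cond=0):
--     if w <= 0:
--         return 0
--     j = w - 1
--     while j > 0 and app[j - 1] == app[j]: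
--         j -= 1
--     return sum(1 for i in range(j, w)
--                if (cond == 0 and list1[i] > comp) or (cond == 1 and list1[i] < comp))
-- ===== Notes on version B (the rewrite author's own statement) =====
-- stated objective: alternative
-- what changed: Instead of scanning all w elements and resetting the count at every app-group boundary, B walks back from w-1 to the start of the last run of equal app values and counts passing elements only in that final run.
import Mathlib
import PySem

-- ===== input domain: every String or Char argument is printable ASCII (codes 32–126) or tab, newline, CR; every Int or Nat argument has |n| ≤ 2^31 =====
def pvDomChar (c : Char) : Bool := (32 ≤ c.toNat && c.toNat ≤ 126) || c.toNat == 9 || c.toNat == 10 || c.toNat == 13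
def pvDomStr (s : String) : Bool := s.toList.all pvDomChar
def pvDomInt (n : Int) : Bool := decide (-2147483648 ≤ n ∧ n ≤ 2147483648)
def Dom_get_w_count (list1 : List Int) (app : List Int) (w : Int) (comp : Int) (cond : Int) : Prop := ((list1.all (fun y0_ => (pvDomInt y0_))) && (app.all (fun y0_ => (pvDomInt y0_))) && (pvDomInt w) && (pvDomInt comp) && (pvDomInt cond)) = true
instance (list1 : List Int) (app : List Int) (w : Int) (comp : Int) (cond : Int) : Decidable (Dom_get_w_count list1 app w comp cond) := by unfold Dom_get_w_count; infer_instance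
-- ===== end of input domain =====

-- B replaces A's full scan with its boundary resets by locating the start of the
-- last run of equal app values and counting only that final run (objective: alternative decomposition).

-- ===== PORT A =====
-- literal transliteration of A's while loop as a fold over range(0, w)
def get_w_count (list1 : List Int) (app : List Int) (w : Int) (comp : Int) (cond : Int) : Int :=
  (PySem.List.pyRange 0 w 1).foldl (fun count i =>
    let count := if i ≠ 0 ∧ PySem.List.pyGetD app (i - 1) 0 ≠ PySem.List.pyGetD app i 0 then 0 else count
    if cond = 0 ∧ PySem.List.pyGetD list1 i 0 > comp then count + 1
    else if cond = 1 ∧ PySem.List.pyGetD list1 i 0 < comp then count + 1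
    else count) 0

-- ===== PORT B =====
-- the backwards while loop of Source B: start index of the last run of equal app values in app[0..j]
def pvFindStart (app : List Int) : Nat → Nat
  | 0 => 0
  | j + 1 =>
      if PySem.List.pyGetD app (j : Int) 0 = PySem.List.pyGetD app ((j : Int) + 1) 0 then
        pvFindStart app j
      else j + 1

def get_w_count_alt (list1 : List Int) (app : List Int) (w : Int) (comp : Int) (cond : Int) : Int :=
  if w ≤ 0 then 0
  else
    let j := pvFindStart app (w.toNat - 1)
    (PySem.List.pyRange (j : Int) w 1).foldl (fun c i =>
      if (cond = 0 ∧ PySem.List.pyGetD list1 i 0 > comp) ∨ (cond = 1 ∧ PySem.List.pyGetD list1 i 0 < comp)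
      then c + 1 else c) 0

-- ===== PRECONDITION & SPEC =====
-- Pre_ excludes exactly the inputs where A raises IndexError: positive w overrunning app
-- (only read when w ≥ 2) or overrunning list1 (only read when cond is 0 or 1).
def Pre_get_w_count (list1 : List Int) (app : List Int) (w : Int) (comp : Int) (cond : Int) : Prop :=
  0 < w → ((2 ≤ w → w ≤ (app.length : Int)) ∧ ((cond = 0 ∨ cond = 1) → w ≤ (list1.length : Int)))
instance (list1 : List Int) (app : List Int) (w : Int) (comp : Int) (cond : Int) : Decidable (Pre_get_w_count list1 app w comp cond) := by unfold Pre_get_w_count; infer_instance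
def pvWitness_get_w_count : List Int × List Int × Int × Int × Int := ([1, 3], [5, 5], 2, 0, 0)

def Spec_get_w_count (list1 : List Int) (app : List Int) (w : Int) (comp : Int) (cond : Int) (out : Int) : Prop := out = get_w_count_alt list1 app w comp cond
instance (list1 : List Int) (app : List Int) (w : Int) (comp : Int) (cond : Int) (out : Int) : Decidable (Spec_get_w_count list1 app w comp cond out) := by unfold Spec_get_w_count; infer_instance

-- ===== CLAIM (what is proved, stated in full; the proofs are below) =====
def Claim_equal_get_w_count : Prop := ∀ (list1 : List Int) (app : List Int) (w : Int) (comp : Int) (cond : Int), Dom_get_w_count list1 app w comp cond → Pre_get_w_count list1 app w comp cond → Spec_get_w_count list1 app w comp cond (get_w_count list1 app w comp cond)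

-- ===== LEMMAS AND PROOFS =====

theorem pvFindStart_le (app : List Int) (j : Nat) : pvFindStart app j ≤ j := by
  induction j with
  | zero => simp [pvFindStart]
  | succ j ih => unfold pvFindStart; split <;> omega

-- the increments of the two loop bodies agree (A's if/elif vs B's disjunction)
theorem pvInc_eq (list1 : List Int) (comp cond : Int) (c : Int) (i : Int) :
    (if cond = 0 ∧ PySem.List.pyGetD list1 i 0 > comp then c + 1
     else if cond = 1 ∧ PySem.List.pyGetD list1 i 0 < comp then c + 1
     else c)
    = (if (cond = 0 ∧ PySem.List.pyGetD list1 i 0 > comp) ∨ (cond = 1 ∧ PySem.List.pyGetD list1 i 0 < comp)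
       then c + 1 else c) := by
  split_ifs with h1 h2 h3 h3 <;> first | rfl | (exfalso; tauto)

-- A's step with no group boundary at i equals B's step
theorem pvStepA_keep (list1 app : List Int) (comp cond : Int) (c i : Int)
    (hb : ¬ (i ≠ 0 ∧ PySem.List.pyGetD app (i - 1) 0 ≠ PySem.List.pyGetD app i 0)) :
    (let count := if i ≠ 0 ∧ PySem.List.pyGetD app (i - 1) 0 ≠ PySem.List.pyGetD app i 0 then (0 : Int) else c
     if cond = 0 ∧ PySem.List.pyGetD list1 i 0 > comp then count + 1
     else if cond = 1 ∧ PySem.List.pyGetD list1 i 0 < comp then count + 1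
     else count)
    = (if (cond = 0 ∧ PySem.List.pyGetD list1 i 0 > comp) ∨ (cond = 1 ∧ PySem.List.pyGetD list1 i 0 < comp)
       then c + 1 else c) := by
  simp only [if_neg hb]
  exact pvInc_eq list1 comp cond c i

-- A's step at a group boundary resets the count before incrementing
theorem pvStepA_reset (list1 app : List Int) (comp cond : Int) (c i : Int)
    (hb : i ≠ 0 ∧ PySem.List.pyGetD app (i - 1) 0 ≠ PySem.List.pyGetD app i 0) :
    (let count := if i ≠ 0 ∧ PySem.List.pyGetD app (i - 1) 0 ≠ PySem.List.pyGetD app i 0 then (0 : Int) else c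
     if cond = 0 ∧ PySem.List.pyGetD list1 i 0 > comp then count + 1
     else if cond = 1 ∧ PySem.List.pyGetD list1 i 0 < comp then count + 1
     else count)
    = (if (cond = 0 ∧ PySem.List.pyGetD list1 i 0 > comp) ∨ (cond = 1 ∧ PySem.List.pyGetD list1 i 0 < comp)
       then (0 : Int) + 1 else 0) := by
  simp only [if_pos hb]
  exact pvInc_eq list1 comp cond 0 i

-- main loop invariant: A's fold over range(0, n) equals B's count over the last run
theorem pvMain (list1 app : List Int) (comp cond : Int) (n : Nat) (hn : 1 ≤ n) :
    (PySem.List.pyRange 0 (n : Int) 1).foldl (fun (count : Int) i =>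
      let count := if i ≠ 0 ∧ PySem.List.pyGetD app (i - 1) 0 ≠ PySem.List.pyGetD app i 0 then 0 else count
      if cond = 0 ∧ PySem.List.pyGetD list1 i 0 > comp then count + 1
      else if cond = 1 ∧ PySem.List.pyGetD list1 i 0 < comp then count + 1
      else count) (0 : Int)
    = (PySem.List.pyRange ((pvFindStart app (n - 1) : Nat) : Int) (n : Int) 1).foldl (fun (c : Int) i =>
        if (cond = 0 ∧ PySem.List.pyGetD list1 i 0 > comp) ∨ (cond = 1 ∧ PySem.List.pyGetD list1 i 0 < comp)
        then c + 1 else c) (0 : Int) := by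
  induction n, hn using Nat.le_induction with
  | base =>
      have h1 : PySem.List.pyRange 0 (1 : Int) 1 = [0] := by
        have := PySem.List.pyRange_one_singleton (0 : Int)
        norm_num at this
        exact this
      simp only [Nat.cast_one, h1, pvFindStart, Nat.cast_zero, List.foldl]
      exact pvStepA_keep list1 app comp cond 0 0 (by simp)
  | succ m hm ih =>
      obtain ⟨k, rfl⟩ : ∃ k, m = k + 1 := ⟨m - 1, by omega⟩
      have hA : PySem.List.pyRange 0 (((k + 1 + 1 : Nat)) : Int) 1
          = PySem.List.pyRange 0 ((k + 1 : Nat) : Int) 1 ++ [((k + 1 : Nat) : Int)] := by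
        push_cast
        exact PySem.List.pyRange_one_succ_right (by positivity)
      rw [hA, List.foldl_append]
      simp only [Nat.add_sub_cancel] at ih ⊢
      by_cases hb : PySem.List.pyGetD app ((k : Int)) 0 = PySem.List.pyGetD app ((k : Int) + 1) 0
      · -- no boundary at k+1: last run extends, count carried over
        have hs : pvFindStart app (k + 1) = pvFindStart app k := by
          rw [pvFindStart, if_pos hb]
        rw [hs]
        have hle : ((pvFindStart app k : Nat) : Int) ≤ ((k + 1 : Nat) : Int) := by
          have := pvFindStart_le app k; push_cast; omega
        have hB : PySem.List.pyRange ((pvFindStart app k : Nat) : Int) (((k + 1 + 1 : Nat)) : Int) 1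
            = PySem.List.pyRange ((pvFindStart app k : Nat) : Int) ((k + 1 : Nat) : Int) 1 ++ [((k + 1 : Nat) : Int)] := by
          push_cast
          push_cast at hle
          exact PySem.List.pyRange_one_succ_right hle
        rw [hB, List.foldl_append, ih]
        simp only [List.foldl]
        refine pvStepA_keep list1 app comp cond _ _ ?_
        push_cast
        intro h
        exact h.2 (by rw [add_sub_cancel_right]; exact hb)
      · -- boundary at k+1: count resets, last run is exactly [k+1, k+2)
        have hs : pvFindStart app (k + 1) = k + 1 := by
          rw [pvFindStart, if_neg hb]
        rw [hs]
        have hB : PySem.List.pyRange ((k + 1 : Nat) : Int) (((k + 1 + 1 : Nat)) : Int) 1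
            = [((k + 1 : Nat) : Int)] := by
          push_cast
          have := PySem.List.pyRange_one_singleton ((k : Int) + 1)
          convert this using 2
        rw [hB]
        simp only [List.foldl]
        refine pvStepA_reset list1 app comp cond _ _ ?_
        constructor
        · push_cast; omega
        · push_cast; rw [add_sub_cancel_right]; exact hb

-- ===== VERDICT (by name: the statement is the Claim_ definition above) =====
theorem get_w_count_spec : Claim_equal_get_w_count := by
  intro list1 app w comp cond _hdom _hpre
  unfold Spec_get_w_count get_w_count get_w_count_alt
  by_cases hw : w ≤ 0
  · simp [hw, PySem.List.pyRange_one_eq_nil hw]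
  · rw [if_neg hw]
    rw [not_le] at hw
    have hn : 1 ≤ w.toNat := by omega
    have hcast : ((w.toNat : Nat) : Int) = w := by omega
    have := pvMain list1 app comp cond w.toNat hn
    rw [hcast] at this
    exact this
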